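-- pv_equiv track=rewrite | github.com/SteadBytes/AoC-2017 | 20/20.py | remove_collisions
-- ===== SOURCE A (Python) =====
-- def remove_collisions(particles):
--     positions = {}
--     delete = []
--     for i, p in enumerate(particles):
--         pos = tuple(p[0])
--         if pos in positions:
--             delete += [i, positions[pos]]
--         else:
--             positions[pos] = i
--     return [p for i, p in enumerate(particles) if i not in delete]
-- ===== SOURCE B (Python) =====
-- def remove_collisions(particles):
--     counts = {}
--     for p in particles:
--         pos = tuple(p[0])
--         counts[pos] = counts.get(pos, 0) + 1
--     return [p for p in particles if counts[tuple(p[0])] == 1]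
-- ===== Notes on version B (the rewrite author's own statement) =====
-- stated objective: simpler
-- what changed: B replaces A's first-seen-index dict plus a growing list of removal indices (and the final index-membership filter) by a single per-position frequency table built in one pass, filtering particles whose position count is 1; the index bookkeeping disappears entirely.
import Mathlib
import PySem

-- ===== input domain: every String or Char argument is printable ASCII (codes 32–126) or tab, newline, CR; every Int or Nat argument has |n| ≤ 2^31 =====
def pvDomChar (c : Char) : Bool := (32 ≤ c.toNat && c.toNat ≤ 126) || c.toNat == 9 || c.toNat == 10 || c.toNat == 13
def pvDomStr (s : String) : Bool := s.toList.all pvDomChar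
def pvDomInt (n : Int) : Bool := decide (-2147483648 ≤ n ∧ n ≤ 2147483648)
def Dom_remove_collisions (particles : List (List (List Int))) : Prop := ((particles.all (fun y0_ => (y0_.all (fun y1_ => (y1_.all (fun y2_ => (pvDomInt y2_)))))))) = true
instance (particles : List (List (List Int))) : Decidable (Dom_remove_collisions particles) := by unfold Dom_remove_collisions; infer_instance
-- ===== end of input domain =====

-- B replaces A's first-seen-index dict + removal-index list + final index-membership filter by a
-- single per-position frequency table, keeping particles whose position count is 1 (objective: simpler).

-- ===== PORT A =====
-- helper: one iteration of A's first loop (i, p = enumerate element; pos = tuple(p[0]))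
def pvStepA (st : PySem.Dict (List Int) Int × List Int) (ip : Int × List (List Int)) :
    PySem.Dict (List Int) Int × List Int :=
  match st.1.get? (ip.2.headD []) with  -- pos = tuple(p[0]); 'pos in positions' + 'positions[pos]' as one lookup
  | some j => (st.1, st.2 ++ [ip.1, j])
  | none   => (st.1.insert (ip.2.headD []) ip.1, st.2)

def remove_collisions (particles : List (List (List Int))) : List (List (List Int)) :=
  let st := (PySem.List.enumerate particles 0).foldl pvStepA (PySem.Dict.empty, [])
  ((PySem.List.enumerate particles 0).filter (fun ip => !(st.2.contains ip.1))).map (·.2)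

-- ===== PORT B =====
def remove_collisions_alt (particles : List (List (List Int))) : List (List (List Int)) :=
  let counts := particles.foldl
    (fun (d : PySem.Dict (List Int) Int) p =>
      let pos := p.headD []
      d.insert pos (d.getD pos 0 + 1)) PySem.Dict.empty
  particles.filter (fun p => counts.getD (p.headD []) 0 == 1)

-- ===== PRECONDITION & SPEC =====
-- Pre_ excludes exactly the inputs on which A raises IndexError: some particle p is the empty list (p[0] fails; B raises there too).
def Pre_remove_collisions (particles : List (List (List Int))) : Prop :=
  ∀ p ∈ particles, p ≠ []
instance (particles : List (List (List Int))) : Decidable (Pre_remove_collisions particles) := by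
  unfold Pre_remove_collisions; infer_instance
def pvWitness_remove_collisions : List (List (List Int)) :=
  [[[0, 1], [2]], [[3], [4]], [[0, 1], [5]]]
def Spec_remove_collisions (particles : List (List (List Int))) (out : List (List (List Int))) : Prop := out = remove_collisions_alt particles
instance (particles : List (List (List Int))) (out : List (List (List Int))) : Decidable (Spec_remove_collisions particles out) := by unfold Spec_remove_collisions; infer_instance

-- ===== CLAIM (what is proved, stated in full; the proofs are below) =====
def Claim_equal_remove_collisions : Prop := ∀ (particles : List (List (List Int))), Dom_remove_collisions particles → Pre_remove_collisions particles → Spec_remove_collisions particles (remove_collisions particles)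

-- ===== LEMMAS AND PROOFS =====

theorem pv_getD_append_left {α : Type} [Inhabited α] (l l' : List α) (x : α) (n : Nat) (h : n < l.length) :
    (l ++ l').getD n x = l.getD n x := by
  simp [List.getD_eq_getElem?_getD, List.getElem?_append_left h]

theorem pv_getD_append_len {α : Type} (l : List α) (q x : α) : (l ++ [q]).getD l.length x = q := by
  simp [List.getD_eq_getElem?_getD]

theorem pv_mem_of_getD {α : Type} (l : List α) (k : Nat) (x : α) (h : k < l.length) : l.getD k x ∈ l := by
  rw [List.getD_eq_getElem?_getD, List.getElem?_eq_getElem h]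
  exact List.getElem_mem _



theorem pv_count_split (P : List (List Int)) (c : List Int) (k : Nat) :
    P.count c = (P.take k).count c + (P.drop k).count c := by
  rw [← List.count_append, List.take_append_drop]

theorem pv_two_le_count (P : List (List Int)) (k m : Nat) (hk : k < P.length) (hm : m < P.length)
    (hne : k ≠ m) (h1 : P.getD k [] = P.getD m []) : 2 ≤ P.count (P.getD m []) := by
  have key : ∀ (a b : Nat), a < b → b < P.length → P.getD a [] = P.getD b [] →
      2 ≤ P.count (P.getD b []) := by
    intro a b hab hb heq
    have ha : a < P.length := by omega
    have ht : P.getD b [] ∈ P.take b := by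
      refine List.mem_take_iff_getElem.mpr ⟨a, by omega, ?_⟩
      rw [← heq]; simp [List.getD_eq_getElem?_getD, List.getElem?_eq_getElem ha]
    have hd : P.getD b [] ∈ P.drop b := by
      have h0 : (P.drop b)[0]'(by simp; omega) = P[b] := by simp
      rw [show P.getD b [] = P[b] by simp [List.getD_eq_getElem?_getD, List.getElem?_eq_getElem hb]]
      exact h0 ▸ List.getElem_mem _
    have c1 := List.one_le_count_iff.mpr ht
    have c2 := List.one_le_count_iff.mpr hd
    have := pv_count_split P (P.getD b []) b
    omega
  rcases Nat.lt_or_ge k m with h | h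
  · exact key k m h hm h1
  · have := key m k (by omega) hk h1.symm
    rwa [← h1]

theorem pv_count_single_eq {α : Type} [BEq α] [LawfulBEq α] (c q : α) (h : c = q) :
    List.count c [q] = 1 := by simp [h]

theorem pv_count_single_ne {α : Type} [BEq α] [LawfulBEq α] (c q : α) (h : c ≠ q) :
    List.count c [q] = 0 := by
  simp [List.count_singleton]
  exact fun hh => h hh.symm

theorem pvLoopDel (l : List (List (List Int))) :
    ∀ (P : List (List Int)) (d : PySem.Dict (List Int) Int) (del : List Int),
    (∀ q j, d.get? q = some j → ∃ m : Nat, j = (m : Int) ∧ m < P.length ∧ P.getD m [] = q) →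
    (∀ q, d.get? q = none ↔ q ∉ P) →
    (∀ i : Int, i ∈ del ↔ ∃ k : Nat, i = (k : Int) ∧ k < P.length ∧ 2 ≤ P.count (P.getD k [])) →
    ∀ i : Int,
      i ∈ ((PySem.List.enumerate l (P.length : Int)).foldl pvStepA (d, del)).2 ↔
      ∃ k : Nat, i = (k : Int) ∧ k < (P ++ l.map (fun p => p.headD [])).length ∧
        2 ≤ (P ++ l.map (fun p => p.headD [])).count ((P ++ l.map (fun p => p.headD [])).getD k []) := by
  induction l with
  | nil => intro P d del hsome hnone hdel i; simpa [PySem.List.enumerate] using hdel i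
  | cons p l ih =>
    intro P d del hsome hnone hdel i
    rw [PySem.List.enumerate_cons, List.foldl_cons]
    have hassoc : P ++ (p :: l).map (fun p => p.headD []) =
        (P ++ [p.headD []]) ++ l.map (fun p => p.headD []) := by simp
    have hlen' : (P ++ [p.headD []]).length = P.length + 1 := by simp
    have hstart : ((P.length : Int) + 1) = (((P ++ [p.headD []]).length : Nat) : Int) := by
      simp
    rw [hassoc]
    have hcount' : ∀ c, (P ++ [p.headD []]).count c = P.count c + [p.headD []].count c :=
      fun c => List.count_append ..
    have hPq : (P ++ [p.headD []]).getD P.length [] = p.headD [] := pv_getD_append_len _ _ _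
    rcases hget : d.get? (p.headD []) with _ | j
    · -- fresh position: insert it
      have hqP : p.headD [] ∉ P := (hnone _).mp hget
      have step_eq : pvStepA (d, del) ((P.length : Int), p) = (d.insert (p.headD []) (P.length : Int), del) := by
        unfold pvStepA; rw [show ((P.length : Int), p).2.headD [] = p.headD [] from rfl, hget]
      rw [step_eq, hstart]
      apply ih (P ++ [p.headD []]) _ del
      · intro r j' hr
        rw [PySem.Dict.get?_insert] at hr
        by_cases hrq : r = p.headD []
        · rw [if_pos hrq] at hr
          have hj' : j' = (P.length : Int) := by injection hr with h; omega
          exact ⟨P.length, hj', by omega, by rw [hrq]; exact pv_getD_append_len _ _ _⟩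
        · rw [if_neg hrq] at hr
          obtain ⟨m, hm1, hm2, hm3⟩ := hsome r j' hr
          exact ⟨m, hm1, by omega, by rw [pv_getD_append_left _ _ _ _ hm2]; exact hm3⟩
      · intro r
        rw [PySem.Dict.get?_insert]
        by_cases hrq : r = p.headD []
        · rw [if_pos hrq]
          simp [hrq]
        · rw [if_neg hrq]
          rw [hnone r]
          simp only [List.mem_append, List.mem_singleton]
          constructor
          · exact fun h => fun hc => hc.elim h (fun h' => hrq h')
          · exact fun h => fun h' => h (Or.inl h')
      · intro i'
        rw [hdel i']
        constructor
        · rintro ⟨k, hk1, hk2, hk3⟩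
          refine ⟨k, hk1, by omega, ?_⟩
          rw [pv_getD_append_left _ _ _ _ hk2, hcount']
          omega
        · rintro ⟨k, hk1, hk2, hk3⟩
          rcases Nat.lt_or_ge k P.length with hlt | hge
          · rw [pv_getD_append_left _ _ _ _ hlt, hcount'] at hk3
            have hmem : P.getD k [] ∈ P := pv_mem_of_getD _ _ _ hlt
            have hne : P.getD k [] ≠ p.headD [] := fun h => hqP (h ▸ hmem)
            rw [pv_count_single_ne _ _ hne] at hk3
            exact ⟨k, hk1, hlt, by omega⟩
          · exfalso
            have hkk : k = P.length := by omega
            rw [hkk, hPq, hcount', pv_count_single_eq _ _ rfl,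
              List.count_eq_zero.mpr hqP] at hk3
            omega
    · -- duplicate position: record both indices
      obtain ⟨m0, hj, hm0, hm0v⟩ := hsome _ j hget
      have hqP : p.headD [] ∈ P := hm0v ▸ pv_mem_of_getD _ _ _ hm0
      have hcq : 1 ≤ P.count (p.headD []) := List.one_le_count_iff.mpr hqP
      have step_eq : pvStepA (d, del) ((P.length : Int), p) = (d, del ++ [(P.length : Int), j]) := by
        unfold pvStepA; rw [show ((P.length : Int), p).2.headD [] = p.headD [] from rfl, hget]
      rw [step_eq, hstart]
      apply ih (P ++ [p.headD []]) d (del ++ [(P.length : Int), j])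
      · intro r j' hr
        obtain ⟨m, hm1, hm2, hm3⟩ := hsome r j' hr
        exact ⟨m, hm1, by omega, by rw [pv_getD_append_left _ _ _ _ hm2]; exact hm3⟩
      · intro r
        rw [hnone r]
        constructor
        · intro hrP
          simp only [List.mem_append, List.mem_singleton]
          exact fun h => hrP (h.elim id (fun h' => h' ▸ hqP))
        · intro h
          simp only [List.mem_append, List.mem_singleton] at h
          exact fun h' => h (Or.inl h')
      · intro i'
        constructor
        · intro hmem
          simp only [List.mem_append, List.mem_cons, List.not_mem_nil, or_false] at hmem
          rcases hmem with hmem | hi | hi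
          · obtain ⟨k, hk1, hk2, hk3⟩ := (hdel i').mp hmem
            refine ⟨k, hk1, by omega, ?_⟩
            rw [pv_getD_append_left _ _ _ _ hk2, hcount']
            omega
          · refine ⟨P.length, hi, by omega, ?_⟩
            rw [hPq, hcount', pv_count_single_eq _ _ rfl]
            omega
          · refine ⟨m0, by rw [hi, hj], by omega, ?_⟩
            rw [pv_getD_append_left _ _ _ _ hm0, hm0v, hcount', pv_count_single_eq _ _ rfl]
            omega
        · rintro ⟨k, hk1, hk2, hk3⟩
          simp only [List.mem_append, List.mem_cons, List.not_mem_nil, or_false]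
          rcases Nat.lt_or_ge k P.length with hlt | hge
          · rw [pv_getD_append_left _ _ _ _ hlt, hcount'] at hk3
            by_cases hrq : P.getD k [] = p.headD []
            · rw [pv_count_single_eq _ _ hrq] at hk3
              by_cases h2 : 2 ≤ P.count (p.headD [])
              · exact Or.inl ((hdel i').mpr ⟨k, hk1, hlt, by rw [hrq]; omega⟩)
              · right; right
                have hkm0 : k = m0 := by
                  by_contra hne
                  have := pv_two_le_count P k m0 hlt hm0 hne (by rw [hrq, hm0v])
                  rw [hm0v] at this; omega
                rw [hk1, hkm0, hj]
            · rw [pv_count_single_ne _ _ hrq] at hk3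
              exact Or.inl ((hdel i').mpr ⟨k, hk1, hlt, by omega⟩)
          · right; left
            have : k = P.length := by omega
            rw [hk1, this]

theorem pv_filter_enumerate {α : Type} (xs : List α) :
    ∀ (s : Int) (P : Int → Bool) (Q : α → Bool),
    (∀ (k : Nat) (hk : k < xs.length), P (s + k) = Q (xs[k])) →
    ((PySem.List.enumerate xs s).filter (fun ip => P ip.1)).map (·.2) = xs.filter Q := by
  induction xs with
  | nil => intro s P Q h; simp [PySem.List.enumerate]
  | cons x xs ih =>
    intro s P Q h
    rw [PySem.List.enumerate_cons, List.filter_cons, List.filter_cons]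
    have h0 : P s = Q x := by simpa using h 0 (by simp)
    have hrest := ih (s + 1) P Q (fun k hk => by
      have := h (k + 1) (by simpa using Nat.succ_lt_succ hk)
      simpa [add_assoc, add_comm, add_left_comm] using this)
    have hP : P ((s, x) : Int × α).1 = Q x := h0
    rw [hP]
    rcases hQ : Q x with _ | _
    · simp [hrest]
    · simp [hrest]

theorem pv_main (particles : List (List (List Int))) :
    remove_collisions particles = remove_collisions_alt particles := by
  show ((PySem.List.enumerate particles 0).filter
      (fun ip => !(((PySem.List.enumerate particles 0).foldl pvStepA
        (PySem.Dict.empty, [])).2.contains ip.1))).map (·.2) =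
    particles.filter (fun p =>
      (particles.foldl (fun (d : PySem.Dict (List Int) Int) p =>
        d.insert (p.headD []) (d.getD (p.headD []) 0 + 1)) PySem.Dict.empty).getD (p.headD []) 0 == 1)
  have hdel0 := pvLoopDel particles [] PySem.Dict.empty []
    (by intro q j h; rw [PySem.Dict.get?_empty] at h; cases h)
    (by intro q; simp [PySem.Dict.get?_empty])
    (by intro i; simp)
  simp only [List.length_nil, Nat.cast_zero, List.nil_append] at hdel0
  have hfold : (particles.map (fun p => p.headD [])).foldl
      (fun (d : PySem.Dict (List Int) Int) x => d.insert x (d.getD x 0 + 1))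
      PySem.Dict.empty =
      particles.foldl (fun (d : PySem.Dict (List Int) Int) p =>
        d.insert (p.headD []) (d.getD (p.headD []) 0 + 1)) PySem.Dict.empty :=
    List.foldl_map ..
  have hcounts : ∀ r, (particles.foldl (fun (d : PySem.Dict (List Int) Int) p =>
        d.insert (p.headD []) (d.getD (p.headD []) 0 + 1)) PySem.Dict.empty).getD r 0 =
      ((particles.map (fun p => p.headD [])).count r : Int) := by
    intro r
    rw [← hfold, PySem.Dict.getD_foldl_insert_add_one, PySem.Dict.getD_empty]
    ring
  refine pv_filter_enumerate particles 0
    (fun i => !(((PySem.List.enumerate particles 0).foldl pvStepA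
      (PySem.Dict.empty, [])).2.contains i))
    (fun p => ((particles.foldl (fun (d : PySem.Dict (List Int) Int) p =>
      d.insert (p.headD []) (d.getD (p.headD []) 0 + 1)) PySem.Dict.empty).getD (p.headD []) 0 == 1))
    ?_
  intro k hk
  simp only []
  have hKk : (particles.map (fun p => p.headD [])).getD k [] = particles[k].headD [] := by
    rw [List.getD_eq_getElem?_getD, List.getElem?_eq_getElem (by simpa using hk)]
    simp
  have hKmem : particles[k].headD [] ∈ particles.map (fun p => p.headD []) := by
    rw [← hKk]
    exact pv_mem_of_getD _ _ _ (by simpa using hk)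
  have h1 : 1 ≤ (particles.map (fun p => p.headD [])).count (particles[k].headD []) :=
    List.one_le_count_iff.mpr hKmem
  have hmemiff := hdel0 ((0 : Int) + (k : Int))
  rw [hcounts]
  rcases hb : ((PySem.List.enumerate particles 0).foldl pvStepA (PySem.Dict.empty, [])).2.contains ((0 : Int) + (k : Int)) with _ | _
  · -- not in delete: count must be 1
    have hnotmem : ((0 : Int) + (k : Int)) ∉ ((PySem.List.enumerate particles 0).foldl pvStepA (PySem.Dict.empty, [])).2 := by
      intro hmm
      rw [← List.contains_iff_mem] at hmm
      rw [hb] at hmm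
      cases hmm
    have hno2 : ¬ 2 ≤ (particles.map (fun p => p.headD [])).count (particles[k].headD []) := by
      intro h2
      exact hnotmem (hmemiff.mpr ⟨k, by ring, by simpa using hk, by rw [hKk]; exact h2⟩)
    have hc1 : (particles.map (fun p => p.headD [])).count (particles[k].headD []) = 1 := by omega
    simp only [List.headD] at hc1 ⊢
    simp [hc1]
  · -- in delete: count ≥ 2
    have hmm : ((0 : Int) + (k : Int)) ∈ ((PySem.List.enumerate particles 0).foldl pvStepA (PySem.Dict.empty, [])).2 :=
      List.contains_iff_mem.mp hb
    obtain ⟨k', hk'1, hk'2, hk'3⟩ := hmemiff.mp hmm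
    have hkk' : k' = k := by omega
    rw [hkk', hKk] at hk'3
    have hc1 : ¬ ((particles.map (fun p => p.headD [])).count (particles[k].headD []) : Int) = 1 := by
      omega
    simp only [List.headD] at hc1 ⊢
    simp [hc1]

-- ===== VERDICT (by name: the statement is the Claim_ definition above) =====
theorem remove_collisions_spec : Claim_equal_remove_collisions := by
  intro particles _ _
  unfold Spec_remove_collisions
  exact pv_main particles
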